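-- pv_equiv track=rewrite | github.com/manwar/perlweeklychallenge-club | challenge-117/roger-bell-west/python/ch-2.py | fpp
-- ===== SOURCE A (Python) =====
-- def fpp(n):
--   o=set()
--   chain=[["",0,0]]
--   lim=(n-1)*4
--   if n==1:
--     lim=2
--   while len(chain)>0:
--     p=chain.pop()
--     x=p[1]
--     y=p[2]
--     if y >= lim:
--       o.add(p[0])
--     else:
--       mxx=y+1
--       if y >= n:
--         mxx=lim-y-1
--       for txi in range(3):
--         tx=x-1+txi
--         if tx>=0 and tx<=mxx:
--           if txi==0:
--             chain.append([p[0]+'H',x-1,y+1])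
--           elif txi==1:
--             chain.append([p[0]+'R',x,y+2])
--           else:
--             chain.append([p[0]+'L',x+1,y+1])
--   y=list(o)
--   y.sort()
--   return y
-- ===== SOURCE B (Python) =====
-- def fpp(n):
--   lim = 2 if n == 1 else (n - 1) * 4
--   def walk(s, x, y):
--     if y >= lim:
--       return [s]
--     mxx = lim - y - 1 if y >= n else y + 1
--     out = []
--     if 0 <= x - 1 <= mxx:
--       out += walk(s + 'H', x - 1, y + 1)
--     if 0 <= x <= mxx:
--       out += walk(s + 'R', x, y + 2)
--     if 0 <= x + 1 <= mxx:
--       out += walk(s + 'L', x + 1, y + 1)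
--     return out
--   return sorted(walk('', 0, 0))
-- ===== Notes on version B (the rewrite author's own statement) =====
-- stated objective: simpler
-- what changed: A's explicit-stack DFS that accumulates paths in a set and then sorts is replaced by a direct recursive enumeration (walk over the three moves) returning a list, sorted at the end; no set is needed because distinct climb paths yield distinct strings.
import Mathlib
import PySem

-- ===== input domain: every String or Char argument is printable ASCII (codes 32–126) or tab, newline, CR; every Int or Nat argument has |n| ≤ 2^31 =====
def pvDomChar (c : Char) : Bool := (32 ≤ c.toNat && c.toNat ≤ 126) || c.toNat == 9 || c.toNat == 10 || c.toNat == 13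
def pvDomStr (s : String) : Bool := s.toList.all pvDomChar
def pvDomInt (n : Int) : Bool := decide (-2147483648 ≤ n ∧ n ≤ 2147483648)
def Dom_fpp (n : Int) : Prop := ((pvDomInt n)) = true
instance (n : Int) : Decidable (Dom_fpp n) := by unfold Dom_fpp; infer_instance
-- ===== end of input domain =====

-- B replaces A's explicit-stack DFS + set by a direct recursive enumeration returning a list (no set needed: each path yields a distinct string); objective: simpler.

-- ===== PORT A =====
-- weight/measure used only for termination of A's while-loop
def fppWt (lim y : Int) : Nat := 4 ^ ((lim - y).toNat + 1)
def fppMeas (lim : Int) (c : List (String × Int × Int)) : Nat :=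
  (c.map (fun p => fppWt lim p.2.2)).sum

theorem fppWt_pos (lim y : Int) : 0 < fppWt lim y := by
  unfold fppWt; positivity

theorem fppWt_succ_le (lim y : Int) (h : y < lim) :
    fppWt lim (y + 1) ≤ 4 ^ (lim - y).toNat := by
  unfold fppWt
  have : (lim - (y + 1)).toNat + 1 ≤ (lim - y).toNat := by omega
  exact Nat.pow_le_pow_right (by norm_num) this

theorem fppWt_succ2_le (lim y : Int) (h : y < lim) :
    fppWt lim (y + 2) ≤ 4 ^ (lim - y).toNat := by
  unfold fppWt
  have : (lim - (y + 2)).toNat + 1 ≤ (lim - y).toNat := by omega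
  exact Nat.pow_le_pow_right (by norm_num) this

theorem fppWt_expand (lim y : Int) :
    fppWt lim y = 4 * 4 ^ (lim - y).toNat := by
  unfold fppWt
  rw [pow_succ, Nat.mul_comm]

theorem fppMeas_cons (lim : Int) (s' : String) (x' y' : Int) (rest : List (String × Int × Int)) :
    fppMeas lim ((s', x', y') :: rest) = fppWt lim y' + fppMeas lim rest := rfl

theorem fppMeas_append (lim : Int) (l1 l2 : List (String × Int × Int)) :
    fppMeas lim (l1 ++ l2) = fppMeas lim l1 + fppMeas lim l2 := by
  unfold fppMeas
  rw [List.map_append, List.sum_append]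

theorem fppMeas_reverse (lim : Int) (l : List (String × Int × Int)) :
    fppMeas lim l.reverse = fppMeas lim l := by
  unfold fppMeas
  rw [List.map_reverse, List.sum_reverse]

theorem fppMeas_if_le (lim : Int) (c : Prop) [Decidable c] (s' : String) (x' y' : Int) :
    fppMeas lim (if c then [(s', x', y')] else []) ≤ fppWt lim y' := by
  split_ifs
  · exact Nat.le_of_eq (Nat.add_zero _)
  · exact Nat.zero_le _

theorem fppWt_three (lim y : Int) (h : ¬ lim ≤ y) :
    fppWt lim (y + 1) + fppWt lim (y + 2) + fppWt lim (y + 1) < fppWt lim y := by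
  have hy' : y < lim := lt_of_not_ge h
  have h0 : 0 < 4 ^ (lim - y).toNat := by positivity
  have h1 := fppWt_succ_le lim y hy'
  have h2 := fppWt_succ2_le lim y hy'
  have h4 := fppWt_expand lim y
  omega

theorem fppLoop_dec1 (lim : Int) (s : String) (x y : Int) (rest : List (String × Int × Int)) :
    fppMeas lim rest < fppMeas lim ((s, x, y) :: rest) := by
  rw [fppMeas_cons]
  exact Nat.lt_add_of_pos_left (fppWt_pos lim y)

theorem fppLoop_dec2 (n lim : Int) (s : String) (x y : Int) (rest : List (String × Int × Int))
    (h : ¬ lim ≤ y) :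
    fppMeas lim
      ((((if 0 ≤ x - 1 ∧ x - 1 ≤ (if n ≤ y then lim - y - 1 else y + 1) then
            [(s ++ "H", x - 1, y + 1)] else []) ++
         (if 0 ≤ x ∧ x ≤ (if n ≤ y then lim - y - 1 else y + 1) then
            [(s ++ "R", x, y + 2)] else [])) ++
         (if 0 ≤ x + 1 ∧ x + 1 ≤ (if n ≤ y then lim - y - 1 else y + 1) then
            [(s ++ "L", x + 1, y + 1)] else [])).reverse ++ rest) <
      fppMeas lim ((s, x, y) :: rest) := by
  rw [fppMeas_append, fppMeas_reverse, fppMeas_append, fppMeas_append, fppMeas_cons]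
  have h1 := fppMeas_if_le lim (0 ≤ x - 1 ∧ x - 1 ≤ (if n ≤ y then lim - y - 1 else y + 1))
    (s ++ "H") (x - 1) (y + 1)
  have h2 := fppMeas_if_le lim (0 ≤ x ∧ x ≤ (if n ≤ y then lim - y - 1 else y + 1))
    (s ++ "R") x (y + 2)
  have h3 := fppMeas_if_le lim (0 ≤ x + 1 ∧ x + 1 ≤ (if n ≤ y then lim - y - 1 else y + 1))
    (s ++ "L") (x + 1) (y + 1)
  have hlt := fppWt_three lim y h
  omega

theorem walkB_dec1 (lim y : Int) (h : ¬ lim ≤ y) : (lim - (y + 1)).toNat < (lim - y).toNat := by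
  omega

theorem walkB_dec2 (lim y : Int) (h : ¬ lim ≤ y) : (lim - (y + 2)).toNat < (lim - y).toNat := by
  omega

-- the while-loop of A: chain is Python's list with its END at the HEAD (pop/append work at the head)
def fppLoop (n lim : Int) (chain : List (String × Int × Int)) (o : PySem.Set String) :
    PySem.Set String :=
  match chain with
  | [] => o
  | (s, x, y) :: rest =>
    if lim ≤ y then
      fppLoop n lim rest (PySem.Set.add o s)
    else
      let mxx := if n ≤ y then lim - y - 1 else y + 1
      -- the for-loop over txi=0,1,2, unrolled: pushes in order H, R, L (so L ends on top)
      let pushes :=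
        (if 0 ≤ x - 1 ∧ x - 1 ≤ mxx then [(s ++ "H", x - 1, y + 1)] else []) ++
        (if 0 ≤ x ∧ x ≤ mxx then [(s ++ "R", x, y + 2)] else []) ++
        (if 0 ≤ x + 1 ∧ x + 1 ≤ mxx then [(s ++ "L", x + 1, y + 1)] else [])
      fppLoop n lim (pushes.reverse ++ rest) o
termination_by fppMeas lim chain
decreasing_by
  · exact fppLoop_dec1 lim s x y rest
  · rename_i hy
    exact fppLoop_dec2 n lim s x y rest hy

def fpp (n : Int) : List String :=
  let lim := (n - 1) * 4
  let lim := if n = 1 then 2 else lim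
  let o := fppLoop n lim [("", 0, 0)] PySem.Set.empty
  PySem.List.sorted o (fun s => s) false

-- ===== PORT B =====
def walkB (n lim : Int) (s : String) (x y : Int) : List String :=
  if lim ≤ y then [s]
  else
    let mxx := if n ≤ y then lim - y - 1 else y + 1
    (if 0 ≤ x - 1 ∧ x - 1 ≤ mxx then walkB n lim (s ++ "H") (x - 1) (y + 1) else []) ++
    (if 0 ≤ x ∧ x ≤ mxx then walkB n lim (s ++ "R") x (y + 2) else []) ++
    (if 0 ≤ x + 1 ∧ x + 1 ≤ mxx then walkB n lim (s ++ "L") (x + 1) (y + 1) else [])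
termination_by (lim - y).toNat
decreasing_by
  all_goals first
    | exact walkB_dec1 lim y (by assumption)
    | exact walkB_dec2 lim y (by assumption)

def fpp_alt (n : Int) : List String :=
  let lim := if n = 1 then 2 else (n - 1) * 4
  PySem.List.sorted (walkB n lim "" 0 0) (fun s => s) false

-- ===== PRECONDITION & SPEC =====
def Spec_fpp (n : Int) (out : List String) : Prop := out = fpp_alt n
instance (n : Int) (out : List String) : Decidable (Spec_fpp n out) := by unfold Spec_fpp; infer_instance

-- ===== CLAIM (what is proved, stated in full; the proofs are below) =====
def Claim_equal_fpp : Prop := ∀ (n : Int), Dom_fpp n → Spec_fpp n (fpp n)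

-- ===== LEMMAS AND PROOFS =====
theorem walk_prefix (n lim : Int) (s : String) (x y : Int) :
    ∀ t ∈ walkB n lim s x y, ∃ u, t.toList = s.toList ++ u := by
  induction s, x, y using walkB.induct n lim with
  | case1 s x y h =>
    intro t ht
    rw [walkB, if_pos h] at ht
    simp only [List.mem_singleton] at ht
    exact ⟨[], by simp [ht]⟩
  | case2 s x y h ih1 ih2 ih3 =>
    intro t ht
    rw [walkB, if_neg h] at ht
    simp only [List.mem_append, List.mem_ite_nil_right] at ht
    rcases ht with (⟨_, ht⟩ | ⟨_, ht⟩) | ⟨_, ht⟩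
    · obtain ⟨u, hu⟩ := ih1 _ ht; exact ⟨'H' :: u, by simpa using hu⟩
    · obtain ⟨u, hu⟩ := ih2 _ ht; exact ⟨'R' :: u, by simpa using hu⟩
    · obtain ⟨u, hu⟩ := ih3 _ ht; exact ⟨'L' :: u, by simpa using hu⟩

theorem walk_nodup (n lim : Int) (s : String) (x y : Int) :
    (walkB n lim s x y).Nodup := by
  induction s, x, y using walkB.induct n lim with
  | case1 s x y h => rw [walkB, if_pos h]; simp
  | case2 s x y h ih1 ih2 ih3 =>
    rw [walkB, if_neg h]
    have hH : ∀ t ∈ walkB n lim (s ++ "H") (x - 1) (y + 1),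
        ∃ u, t.toList = s.toList ++ 'H' :: u := by
      intro t ht; obtain ⟨u, hu⟩ := walk_prefix n lim _ _ _ t ht; exact ⟨u, by simpa using hu⟩
    have hR : ∀ t ∈ walkB n lim (s ++ "R") x (y + 2),
        ∃ u, t.toList = s.toList ++ 'R' :: u := by
      intro t ht; obtain ⟨u, hu⟩ := walk_prefix n lim _ _ _ t ht; exact ⟨u, by simpa using hu⟩
    have hL : ∀ t ∈ walkB n lim (s ++ "L") (x + 1) (y + 1),
        ∃ u, t.toList = s.toList ++ 'L' :: u := by
      intro t ht; obtain ⟨u, hu⟩ := walk_prefix n lim _ _ _ t ht; exact ⟨u, by simpa using hu⟩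
    refine List.Nodup.append (List.Nodup.append ?_ ?_ ?_) ?_ ?_
    · split_ifs <;> first | exact ih1 | exact List.nodup_nil
    · split_ifs <;> first | exact ih2 | exact List.nodup_nil
    · intro t htA htB
      rw [List.mem_ite_nil_right] at htA htB
      obtain ⟨u, hu⟩ := hH t htA.2
      obtain ⟨v, hv⟩ := hR t htB.2
      rw [hu] at hv
      simp at hv
    · split_ifs <;> first | exact ih3 | exact List.nodup_nil
    · intro t htAB htC
      rw [List.mem_ite_nil_right] at htC
      obtain ⟨v, hv⟩ := hL t htC.2
      rcases List.mem_append.1 htAB with h' | h'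
      · rw [List.mem_ite_nil_right] at h'
        obtain ⟨u, hu⟩ := hH t h'.2
        rw [hu] at hv; simp at hv
      · rw [List.mem_ite_nil_right] at h'
        obtain ⟨u, hu⟩ := hR t h'.2
        rw [hu] at hv; simp at hv

theorem mem_loop (n lim : Int) (chain : List (String × Int × Int)) (o : PySem.Set String)
    (a : String) :
    a ∈ fppLoop n lim chain o ↔ a ∈ o ∨ ∃ p ∈ chain, a ∈ walkB n lim p.1 p.2.1 p.2.2 := by
  induction chain, o using fppLoop.induct n lim with
  | case1 o => simp [fppLoop]
  | case2 o s x y rest h ih =>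
    rw [fppLoop, if_pos h, ih]
    have hw : walkB n lim s x y = [s] := by rw [walkB, if_pos h]
    simp only [PySem.Set.mem_add, List.mem_cons]
    constructor
    · rintro ((h1 | h1) | h1)
      · exact Or.inl h1
      · exact Or.inr ⟨(s, x, y), Or.inl rfl, by simp [hw, h1]⟩
      · obtain ⟨p, hp, hap⟩ := h1; exact Or.inr ⟨p, Or.inr hp, hap⟩
    · rintro (h1 | ⟨p, (hp | hp), hap⟩)
      · exact Or.inl (Or.inl h1)
      · subst hp; simp [hw] at hap; exact Or.inl (Or.inr hap)
      · exact Or.inr ⟨p, hp, hap⟩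
  | case3 o s x y rest h mxx pushes ih =>
    have hstep : fppLoop n lim ((s, x, y) :: rest) o =
        fppLoop n lim (pushes.reverse ++ rest) o := by
      rw [fppLoop, if_neg h]
      rfl
    have hp2 : pushes =
        ((if 0 ≤ x - 1 ∧ x - 1 ≤ (if n ≤ y then lim - y - 1 else y + 1) then
            [(s ++ "H", x - 1, y + 1)] else []) ++
         (if 0 ≤ x ∧ x ≤ (if n ≤ y then lim - y - 1 else y + 1) then
            [(s ++ "R", x, y + 2)] else [])) ++
         (if 0 ≤ x + 1 ∧ x + 1 ≤ (if n ≤ y then lim - y - 1 else y + 1) then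
            [(s ++ "L", x + 1, y + 1)] else []) := rfl
    rw [hstep, ih, hp2]
    have hwalk : a ∈ walkB n lim s x y ↔
        ((0 ≤ x - 1 ∧ x - 1 ≤ (if n ≤ y then lim - y - 1 else y + 1)) ∧
            a ∈ walkB n lim (s ++ "H") (x - 1) (y + 1)) ∨
        ((0 ≤ x ∧ x ≤ (if n ≤ y then lim - y - 1 else y + 1)) ∧
            a ∈ walkB n lim (s ++ "R") x (y + 2)) ∨
        ((0 ≤ x + 1 ∧ x + 1 ≤ (if n ≤ y then lim - y - 1 else y + 1)) ∧
            a ∈ walkB n lim (s ++ "L") (x + 1) (y + 1)) := by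
      rw [walkB, if_neg h]
      simp only [List.mem_append, List.mem_ite_nil_right]
      tauto
    apply or_congr Iff.rfl
    constructor
    · rintro ⟨p, hp, hap⟩
      rcases List.mem_append.1 hp with hp | hp
      · rw [List.mem_reverse] at hp
        have goalify : ∀ (c : Prop) [Decidable c] (t : String × Int × Int),
            p ∈ (if c then [t] else []) → c ∧ p = t := by
          intro c _ t hmem
          rw [List.mem_ite_nil_right, List.mem_singleton] at hmem
          exact hmem
        rcases List.mem_append.1 hp with hp' | hp'
        · rcases List.mem_append.1 hp' with h1 | h1
          · obtain ⟨hc, rfl⟩ := goalify _ _ h1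
            exact ⟨(s, x, y), List.mem_cons_self, hwalk.mpr (Or.inl ⟨hc, hap⟩)⟩
          · obtain ⟨hc, rfl⟩ := goalify _ _ h1
            exact ⟨(s, x, y), List.mem_cons_self, hwalk.mpr (Or.inr (Or.inl ⟨hc, hap⟩))⟩
        · obtain ⟨hc, rfl⟩ := goalify _ _ hp'
          exact ⟨(s, x, y), List.mem_cons_self, hwalk.mpr (Or.inr (Or.inr ⟨hc, hap⟩))⟩
      · exact ⟨p, List.mem_cons_of_mem _ hp, hap⟩
    · rintro ⟨p, hp, hap⟩
      rcases List.mem_cons.1 hp with rfl | hp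
      · rcases hwalk.mp hap with ⟨hc, hm⟩ | ⟨hc, hm⟩ | ⟨hc, hm⟩
        · refine ⟨(s ++ "H", x - 1, y + 1), List.mem_append.2 (Or.inl ?_), hm⟩
          rw [List.mem_reverse]
          exact List.mem_append.2 (Or.inl (List.mem_append.2 (Or.inl
            (by rw [List.mem_ite_nil_right]; exact ⟨hc, List.mem_singleton.2 rfl⟩))))
        · refine ⟨(s ++ "R", x, y + 2), List.mem_append.2 (Or.inl ?_), hm⟩
          rw [List.mem_reverse]
          exact List.mem_append.2 (Or.inl (List.mem_append.2 (Or.inr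
            (by rw [List.mem_ite_nil_right]; exact ⟨hc, List.mem_singleton.2 rfl⟩))))
        · refine ⟨(s ++ "L", x + 1, y + 1), List.mem_append.2 (Or.inl ?_), hm⟩
          rw [List.mem_reverse]
          exact List.mem_append.2 (Or.inr
            (by rw [List.mem_ite_nil_right]; exact ⟨hc, List.mem_singleton.2 rfl⟩))
      · exact ⟨p, List.mem_append.2 (Or.inr hp), hap⟩

theorem nodup_loop (n lim : Int) (chain : List (String × Int × Int)) (o : PySem.Set String)
    (ho : o.Nodup) : (fppLoop n lim chain o).Nodup := by
  induction chain, o using fppLoop.induct n lim with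
  | case1 o => simpa [fppLoop] using ho
  | case2 o s x y rest h ih =>
    rw [fppLoop, if_pos h]
    exact ih (PySem.Set.nodup_add o s ho)
  | case3 o s x y rest h mxx pushes ih =>
    have hstep : fppLoop n lim ((s, x, y) :: rest) o =
        fppLoop n lim (pushes.reverse ++ rest) o := by
      rw [fppLoop, if_neg h]
      rfl
    rw [hstep]
    exact ih ho

-- ===== VERDICT (by name: the statement is the Claim_ definition above) =====
theorem fpp_spec : Claim_equal_fpp := by
  intro n _
  unfold Spec_fpp fpp fpp_alt
  apply PySem.List.sorted_eq_sorted_of_perm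
  · exact fun a b hab => hab
  · apply (List.perm_ext_iff_of_nodup ?_ ?_).2
    · intro a
      rw [mem_loop]
      simp [PySem.Set.empty]
    · exact nodup_loop _ _ _ _ (by simp [PySem.Set.empty])
    · exact walk_nodup _ _ _ _ _
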